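-- pv_equiv track=rewrite | github.com/AdityaKushwaha94/Credit-Card-Approval-Prediction | untitled0.py | preprocess_status
-- ===== SOURCE A (Python) =====
-- status_map = {'0': 0, '1': 1, '2': 2, '3': 3, '4': 4, '5': 5, 'C': 0, 'X': 5}
--
-- def preprocess_status(status_sequence):
--     """Convert STATUS sequence to numeric-friendly format."""
--     numeric_sequence = []
--     for char in status_sequence:
--         if char in status_map:
--             numeric_sequence.append(status_map[char])
--         else:
--             numeric_sequence.append(5)  # Default to high risk for unexpected values
--     return sum(numeric_sequence)  # Aggregate the risk score
-- ===== SOURCE B (Python) =====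
-- status_map = {'0': 0, '1': 1, '2': 2, '3': 3, '4': 4, '5': 5, 'C': 0, 'X': 5}
--
-- def preprocess_status(status_sequence):
--     """Convert STATUS sequence to numeric-friendly format."""
--     freq = {}
--     for ch in status_sequence:
--         freq[ch] = freq.get(ch, 0) + 1
--     total = 0
--     for ch, cnt in freq.items():
--         total += cnt * status_map.get(ch, 5)
--     return total
-- ===== Notes on version B (the rewrite author's own statement) =====
-- stated objective: alternative
-- what changed: B builds a character frequency table in one pass and then sums count*risk over the distinct characters, instead of A's per-character list append followed by sum.
import Mathlib
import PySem

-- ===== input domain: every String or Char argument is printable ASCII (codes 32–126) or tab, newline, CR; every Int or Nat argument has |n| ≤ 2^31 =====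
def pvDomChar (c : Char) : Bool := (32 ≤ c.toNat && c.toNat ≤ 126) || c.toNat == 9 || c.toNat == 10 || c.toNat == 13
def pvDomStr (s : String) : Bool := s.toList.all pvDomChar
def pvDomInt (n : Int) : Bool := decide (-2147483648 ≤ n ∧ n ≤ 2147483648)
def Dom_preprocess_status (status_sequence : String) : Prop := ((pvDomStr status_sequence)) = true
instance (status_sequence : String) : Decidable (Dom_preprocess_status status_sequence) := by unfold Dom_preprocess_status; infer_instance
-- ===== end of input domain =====

-- B replaces A's per-character list build + sum by a frequency table summed over distinct characters (alternative decomposition, same cost).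

-- status_map = {'0': 0, '1': 1, '2': 2, '3': 3, '4': 4, '5': 5, 'C': 0, 'X': 5}
def statusMap : PySem.Dict Char Int :=
  PySem.Dict.ofList [('0', 0), ('1', 1), ('2', 2), ('3', 3), ('4', 4), ('5', 5), ('C', 0), ('X', 5)]

-- ===== PORT A =====
def preprocess_status (status_sequence : String) : Int :=
  -- numeric_sequence = []; for char in …: append status_map[char] or 5; return sum(...)
  let numeric_sequence : List Int :=
    status_sequence.toList.foldl
      (fun acc char =>
        if statusMap.contains char then acc ++ [statusMap.getD char 0]
        else acc ++ [5]) []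
  numeric_sequence.sum

-- ===== PORT B =====
def preprocess_status_alt (status_sequence : String) : Int :=
  -- freq = {}; for ch in …: freq[ch] = freq.get(ch, 0) + 1
  let freq : PySem.Dict Char Int :=
    status_sequence.toList.foldl (fun d ch => d.insert ch (d.getD ch 0 + 1)) PySem.Dict.empty
  -- total = 0; for ch, cnt in freq.items(): total += cnt * status_map.get(ch, 5)
  freq.items.foldl (fun total p => total + p.2 * (statusMap.get? p.1).getD 5) 0

-- ===== PRECONDITION & SPEC =====
def Spec_preprocess_status (status_sequence : String) (out : Int) : Prop := out = preprocess_status_alt status_sequence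
instance (status_sequence : String) (out : Int) : Decidable (Spec_preprocess_status status_sequence out) := by unfold Spec_preprocess_status; infer_instance

-- ===== CLAIM (what is proved, stated in full; the proofs are below) =====
def Claim_equal_preprocess_status : Prop := ∀ (status_sequence : String), Dom_preprocess_status status_sequence → Spec_preprocess_status status_sequence (preprocess_status status_sequence)

-- ===== LEMMAS AND PROOFS =====

-- per-character risk value; A's branch and B's .get(ch, 5) agree on it
def risk (c : Char) : Int := (statusMap.get? c).getD 5

lemma risk_eq_branch (c : Char) :
    (if statusMap.contains c then statusMap.getD c 0 else (5 : Int)) = risk c := by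
  by_cases h : statusMap.contains c = true
  · simp [h, risk, PySem.Dict.getD_eq_get?_getD]
    rcases hg : statusMap.get? c with _ | v
    · rw [PySem.Dict.contains_eq_isSome_get?, hg] at h; simp at h
    · rfl
  · simp only [Bool.not_eq_true] at h
    simp [h, risk, (PySem.Dict.get?_eq_none_iff_contains _ _).mpr h]

lemma portA_eq_sum (xs : List Char) :
    (xs.foldl (fun acc char =>
        if statusMap.contains char then acc ++ [statusMap.getD char 0]
        else acc ++ [5]) []).sum = (xs.map risk).sum := by
  have h : (xs.foldl (fun acc char =>
      if statusMap.contains char then acc ++ [statusMap.getD char 0]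
      else acc ++ [5]) [])
      = xs.foldl (fun acc char => acc ++ [risk char]) [] := by
    apply PySem.List.foldl_congr_mem
    intro acc c _
    rw [← risk_eq_branch c]
    by_cases h : statusMap.contains c = true <;> simp [h]
  rw [h, PySem.List.foldl_append_singleton_eq_map]
  simp

lemma portB_eq_sum (xs : List Char) :
    ((xs.foldl (fun d ch => d.insert ch (d.getD ch 0 + 1)) PySem.Dict.empty).items.foldl
      (fun total p => total + p.2 * risk p.1) 0) = (xs.map risk).sum := by
  rw [PySem.Dict.foldl_insert_getD_add_one_eq_counter, PySem.Dict.items_counter]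
  have hadd := PySem.List.foldl_add (l := (PySem.Set.ofList xs).map (fun k => (k, (xs.count k : Int)))) (a := 0) (fun p : Char × Int => p.2 * risk p.1)
  rw [hadd]
  simp only [List.map_map, zero_add]
  have hnd : (PySem.Set.ofList xs).Nodup := PySem.Set.nodup_ofList xs
  have h1 := List.sum_toFinset ((fun p : Char × Int => p.2 * risk p.1) ∘
      fun k => (k, (xs.count k : Int))) hnd
  rw [← h1]
  have hfs : (PySem.Set.ofList xs).toFinset = xs.toFinset := by
    ext c; simp [PySem.Set.mem_ofList]
  rw [hfs, Finset.sum_list_map_count xs risk]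
  simp [Function.comp]

-- ===== VERDICT (by name: the statement is the Claim_ definition above) =====
theorem preprocess_status_spec : Claim_equal_preprocess_status := by
  intro s _
  show preprocess_status s = preprocess_status_alt s
  unfold preprocess_status preprocess_status_alt
  rw [portA_eq_sum]
  have := portB_eq_sum s.toList
  simpa [risk] using this.symm
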